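-- pv_equiv track=rewrite | github.com/bioedca/IVT_K | app/components/plate_grid.py | get_checkerboard_blocked_wells
-- ===== SOURCE A (Python) =====
-- from typing import Optional, List, Dict, Any, Tuple
--
-- ROWS_384 = list("ABCDEFGHIJKLMNOP")
--
-- COLS_384 = list(range(1, 25))
--
-- def get_checkerboard_blocked_wells(plate_format: int = 384, pattern: str = 'A') -> List[str]:
--     """
--     Get all blocked well positions in checkerboard pattern.
--
--     Args:
--         plate_format: 96 or 384
--         pattern: 'A' or 'B'
--
--     Returns:
--         List of blocked well positions
--     """
--     if plate_format != 384:
--         return []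
--
--     blocked = []
--     target_mod = 1 if pattern == 'A' else 0  # Blocked wells have opposite parity
--     for row_idx, row in enumerate(ROWS_384):
--         for col_idx, col in enumerate(COLS_384):
--             if (row_idx + col_idx) % 2 == target_mod:
--                 blocked.append(f"{row}{col}")
--
--     return blocked
-- ===== SOURCE B (Python) =====
-- ROWS_384 = list("ABCDEFGHIJKLMNOP")
--
-- COLS_384 = list(range(1, 25))
--
-- def get_checkerboard_blocked_wells(plate_format: int = 384, pattern: str = 'A') -> list:
--     if plate_format != 384:
--         return []
--     # Two fixed column templates, chosen per row by row parity: no per-cell test.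
--     odd_cols = COLS_384[0::2]    # columns at even column index: 1,3,...,23
--     even_cols = COLS_384[1::2]   # columns at odd column index: 2,4,...,24
--     sel = (even_cols, odd_cols) if pattern == 'A' else (odd_cols, even_cols)
--     out = []
--     for r, row in enumerate(ROWS_384):
--         out += [f"{row}{c}" for c in sel[r % 2]]
--     return out
-- ===== Notes on version B (the rewrite author's own statement) =====
-- stated objective: alternative
-- what changed: Precomputes the two alternating column templates once (COLS_384[0::2] and COLS_384[1::2]), then each row just selects a template by row parity and maps it to well names, eliminating the per-cell parity branch of A's nested scan.
import Mathlib
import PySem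

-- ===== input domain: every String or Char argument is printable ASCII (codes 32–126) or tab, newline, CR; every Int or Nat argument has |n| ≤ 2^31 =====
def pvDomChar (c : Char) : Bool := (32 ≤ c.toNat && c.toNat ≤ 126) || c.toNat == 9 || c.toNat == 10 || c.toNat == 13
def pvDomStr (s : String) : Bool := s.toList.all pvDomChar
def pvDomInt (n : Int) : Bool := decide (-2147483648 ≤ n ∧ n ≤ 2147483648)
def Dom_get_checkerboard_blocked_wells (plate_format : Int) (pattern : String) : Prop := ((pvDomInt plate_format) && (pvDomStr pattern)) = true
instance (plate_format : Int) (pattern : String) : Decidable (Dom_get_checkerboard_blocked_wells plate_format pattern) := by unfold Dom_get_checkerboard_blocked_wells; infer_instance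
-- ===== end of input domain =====

-- ===== PORT A =====
-- B precomputes the two alternating column templates once and selects one per row by row parity (alternative decomposition, same cost class).
def pvRows384 : List Char := "ABCDEFGHIJKLMNOP".toList

def pvCols384 : List Int := PySem.List.pyRange 1 25 1

def get_checkerboard_blocked_wells (plate_format : Int) (pattern : String) : List String :=
  if plate_format ≠ 384 then [] else
  let target_mod : Int := if pattern = "A" then 1 else 0
  (PySem.List.enumerate pvRows384).foldl (fun blocked (ri, row) =>
    (PySem.List.enumerate pvCols384).foldl (fun blocked (ci, col) =>
      if PySem.Int.mod (ri + ci) 2 = target_mod then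
        blocked ++ [String.ofList [row] ++ PySem.Int.toStr col]
      else blocked) blocked) []

-- ===== PORT B =====
def get_checkerboard_blocked_wells_alt (plate_format : Int) (pattern : String) : List String :=
  if plate_format ≠ 384 then [] else
  -- COLS_384[0::2] and COLS_384[1::2]: step literal 2 is nonzero, so slice? is always some
  let odd_cols := (PySem.List.slice? pvCols384 (some 0) none 2).getD []
  let even_cols := (PySem.List.slice? pvCols384 (some 1) none 2).getD []
  let sel := if pattern = "A" then (even_cols, odd_cols) else (odd_cols, even_cols)
  (PySem.List.enumerate pvRows384).foldl (fun out (r, row) =>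
    out ++ ((if PySem.Int.mod r 2 = 0 then sel.1 else sel.2).map
      (fun c => String.ofList [row] ++ PySem.Int.toStr c))) []

-- ===== PRECONDITION & SPEC =====
def Spec_get_checkerboard_blocked_wells (plate_format : Int) (pattern : String) (out : List String) : Prop := out = get_checkerboard_blocked_wells_alt plate_format pattern
instance (plate_format : Int) (pattern : String) (out : List String) : Decidable (Spec_get_checkerboard_blocked_wells plate_format pattern out) := by unfold Spec_get_checkerboard_blocked_wells; infer_instance

-- ===== CLAIM =====
def Claim_equal_get_checkerboard_blocked_wells : Prop := ∀ (plate_format : Int) (pattern : String), Dom_get_checkerboard_blocked_wells plate_format pattern → Spec_get_checkerboard_blocked_wells plate_format pattern (get_checkerboard_blocked_wells plate_format pattern)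

-- ===== LEMMAS AND PROOFS =====

-- ===== VERDICT =====
set_option maxRecDepth 20000 in
set_option maxHeartbeats 1000000 in
theorem get_checkerboard_blocked_wells_spec : Claim_equal_get_checkerboard_blocked_wells := by
  intro pf pat _
  unfold Spec_get_checkerboard_blocked_wells
  unfold get_checkerboard_blocked_wells get_checkerboard_blocked_wells_alt
  by_cases h : pf = 384
  · subst h
    by_cases hp : pat = "A" <;> simp [hp] <;> decide
  · simp [h]
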